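-- pv_equiv track=rewrite | github.com/JAMM-JAMM/algorithm-study | programmers/level1/이상한 문자 만들기.py | solution
-- ===== SOURCE A (Python) =====
-- def solution(s):
--     answer = ''
--     temp = s.split(' ')
--     for i in range(len(temp)):
--         for j in range(len(temp[i])):
--             if (j == 0) or (j % 2 == 0):
--                 answer += temp[i][j].upper()
--             elif j % 2 == 1:
--                 answer += temp[i][j].lower()
--         if i != len(temp)-1:
--             answer += ' '
--     return answer
-- ===== SOURCE B (Python) =====
-- def solution(s):
--     out = []
--     k = 0
--     for c in s:
--         if c == ' ':
--             out.append(' ')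
--             k = 0
--         else:
--             out.append(c.upper() if k % 2 == 0 else c.lower())
--             k += 1
--     return ''.join(out)
-- ===== Notes on version B (the rewrite author's own statement) =====
-- stated objective: simpler
-- what changed: Replaces split-into-words plus a nested per-word index loop and final-word check with a single linear scan that keeps a position counter reset at each space.
import Mathlib
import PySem

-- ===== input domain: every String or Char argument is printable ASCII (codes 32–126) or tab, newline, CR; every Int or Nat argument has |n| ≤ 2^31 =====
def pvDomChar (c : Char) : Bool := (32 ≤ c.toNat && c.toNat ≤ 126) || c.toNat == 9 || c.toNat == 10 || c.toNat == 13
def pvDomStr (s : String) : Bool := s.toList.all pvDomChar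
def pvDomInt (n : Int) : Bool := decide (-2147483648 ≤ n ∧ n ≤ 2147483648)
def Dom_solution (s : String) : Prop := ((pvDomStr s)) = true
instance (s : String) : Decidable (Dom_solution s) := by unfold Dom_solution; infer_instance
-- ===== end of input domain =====

-- B replaces A's split-into-words + nested per-word index loop by one linear scan with a counter reset at spaces (same cost, simpler).

-- ===== PORT A =====
def solution (s : String) : String :=
  let answer : List Char := []
  let temp := PySem.Chars.splitOn s.toList [' ']
  let answer := (PySem.List.enumerate temp 0).foldl (fun answer iw =>
      let answer := (PySem.List.enumerate iw.2 0).foldl (fun answer jc =>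
          if jc.1 == 0 || PySem.Int.mod jc.1 2 == 0 then answer ++ [PySem.Chars.upperChar jc.2]
          else if PySem.Int.mod jc.1 2 == 1 then answer ++ [PySem.Chars.lowerChar jc.2]
          else answer) answer
      if iw.1 != (temp.length : Int) - 1 then answer ++ [' '] else answer) answer
  String.ofList answer

-- ===== PORT B =====
def solution_alt (s : String) : String :=
  String.ofList (s.toList.foldl (fun (st : List Char × Nat) c =>
      if c == ' ' then (st.1 ++ [' '], 0)
      else (st.1 ++ [if st.2 % 2 == 0 then PySem.Chars.upperChar c else PySem.Chars.lowerChar c], st.2 + 1))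
    (([] : List Char), 0)).1

-- ===== PRECONDITION & SPEC =====
def Spec_solution (s : String) (out : String) : Prop := out = solution_alt s
instance (s : String) (out : String) : Decidable (Spec_solution s out) := by unfold Spec_solution; infer_instance

-- ===== CLAIM (what is proved, stated in full; the proofs are below) =====
def Claim_equal_solution : Prop := ∀ (s : String), Dom_solution s → Spec_solution s (solution s)

-- ===== LEMMAS AND PROOFS =====

/-- Alternating-case of one character at word position `k`. -/
def caseChar (k : Nat) (c : Char) : Char :=
  if k % 2 == 0 then PySem.Chars.upperChar c else PySem.Chars.lowerChar c

/-- Alternating-case of a word starting at position `k` (no space handling). -/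
def wordCase : List Char → Nat → List Char
  | [], _ => []
  | c :: cs, k => caseChar k c :: wordCase cs (k + 1)

/-- One-pass specification: transform with a counter that resets at spaces. -/
def onePass : List Char → Nat → List Char
  | [], _ => []
  | c :: cs, k => if c = ' ' then ' ' :: onePass cs 0 else caseChar k c :: onePass cs (k + 1)

/-- Split on the single character ' ' (keeping empty pieces), accumulator form. -/
def splitSp (pre : List Char) : List Char → List (List Char)
  | [] => [pre]
  | c :: cs => if c = ' ' then pre :: splitSp [] cs else splitSp (pre ++ [c]) cs

/-- Join the cased words with single spaces (no trailing space). -/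
def joinCase : List (List Char) → List Char
  | [] => []
  | [w] => wordCase w 0
  | w :: w' :: ws => wordCase w 0 ++ ' ' :: joinCase (w' :: ws)

theorem splitSp_ne_nil (pre l) : splitSp pre l ≠ [] := by
  induction l generalizing pre with
  | nil => simp [splitSp]
  | cons c cs ih => simp only [splitSp]; split <;> simp [ih]

theorem joinCase_cons (w : List Char) (ws : List (List Char)) (h : ws ≠ []) :
    joinCase (w :: ws) = wordCase w 0 ++ ' ' :: joinCase ws := by
  cases ws with
  | nil => exact absurd rfl h
  | cons w' ws' => rfl

theorem wordCase_append (xs : List Char) (c : Char) (k : Nat) :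
    wordCase (xs ++ [c]) k = wordCase xs k ++ [caseChar (k + xs.length) c] := by
  induction xs generalizing k with
  | nil => simp [wordCase]
  | cons x xs ih => simp [wordCase, ih, Nat.add_assoc, Nat.add_comm 1 xs.length]

theorem go_spec (fuel : Nat) (l cur : List Char) (acc : List (List Char)) (h : l.length ≤ fuel) :
    PySem.Chars.splitOn.go [' '] fuel l cur acc = acc.reverse ++ splitSp cur.reverse l := by
  induction fuel generalizing l cur acc with
  | zero =>
    have hl : l = [] := by cases l <;> simp_all
    subst hl
    rw [PySem.Chars.splitOn.go]
    simp [splitSp]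
  | succ fuel ih =>
    cases l with
    | nil =>
      rw [PySem.Chars.splitOn.go]
      · simp [splitSp]
      · omega
    | cons c rest =>
      rw [PySem.Chars.splitOn.go]
      by_cases hc : c = ' '
      · subst hc
        have hp : List.isPrefixOf [' '] (' ' :: rest) = true := by simp [List.isPrefixOf]
        rw [if_pos hp]
        simp only [List.length_cons] at h
        rw [ih _ _ _ (by simpa using Nat.le_of_succ_le_succ h)]
        simp [splitSp]
      · have hp : List.isPrefixOf [' '] (c :: rest) = false := by
          simp [List.isPrefixOf]; exact fun e => (hc e.symm).elim
        rw [if_neg (by simp [hp])]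
        simp only [List.length_cons] at h
        rw [ih _ _ _ (Nat.le_of_succ_le_succ h)]
        simp [splitSp, hc]

theorem splitOn_eq_splitSp (l : List Char) :
    PySem.Chars.splitOn l [' '] = splitSp [] l := by
  rw [PySem.Chars.splitOn, go_spec _ _ _ _ (Nat.le_succ _)]
  simp

theorem join_split (l : List Char) (pre : List Char) :
    joinCase (splitSp pre l) = wordCase pre 0 ++ onePass l pre.length := by
  induction l generalizing pre with
  | nil => simp [splitSp, joinCase, onePass]
  | cons c cs ih =>
    by_cases hc : c = ' '
    · subst hc
      simp only [splitSp, if_true]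
      rw [joinCase_cons _ _ (splitSp_ne_nil [] cs), ih []]
      simp [onePass, wordCase]
    · simp only [splitSp, if_neg hc]
      rw [ih (pre ++ [c])]
      rw [wordCase_append]
      simp [onePass, hc, caseChar]

theorem inner_eq (w : List Char) (k : Nat) (ans : List Char) :
    (PySem.List.enumerate w (k : Int)).foldl (fun answer jc =>
        if jc.1 == 0 || PySem.Int.mod jc.1 2 == 0 then answer ++ [PySem.Chars.upperChar jc.2]
        else if PySem.Int.mod jc.1 2 == 1 then answer ++ [PySem.Chars.lowerChar jc.2]
        else answer) ans = ans ++ wordCase w k := by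
  induction w generalizing k ans with
  | nil => simp [PySem.List.enumerate_nil, wordCase]
  | cons c cs ih =>
    rw [PySem.List.enumerate_cons, List.foldl_cons]
    have hcast : (k : Int) + 1 = ((k + 1 : Nat) : Int) := by push_cast; ring
    by_cases hk : k % 2 = 0
    · have hcond : ((k : Int) == 0 || PySem.Int.mod (k : Int) 2 == 0) = true := by
        simp
        omega
      simp only [hcond, if_true, hcast, ih]
      simp [wordCase, caseChar, hk]
    · have hcond : ((k : Int) == 0 || PySem.Int.mod (k : Int) 2 == 0) = false := by
        simp
        omega
      have hcond2 : (PySem.Int.mod (k : Int) 2 == 1) = true := by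
        simp
        omega
      simp only [hcond, hcond2, if_true, hcast, ih]
      simp [wordCase, caseChar, hk]

theorem outer_eq (ws : List (List Char)) (k n : Nat) (ans : List Char)
    (h : k + ws.length = n) :
    (PySem.List.enumerate ws (k : Int)).foldl (fun answer iw =>
        let answer := (PySem.List.enumerate iw.2 0).foldl (fun answer jc =>
            if jc.1 == 0 || PySem.Int.mod jc.1 2 == 0 then answer ++ [PySem.Chars.upperChar jc.2]
            else if PySem.Int.mod jc.1 2 == 1 then answer ++ [PySem.Chars.lowerChar jc.2]
            else answer) answer
        if iw.1 != (n : Int) - 1 then answer ++ [' '] else answer) ans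
      = ans ++ joinCase ws := by
  induction ws generalizing k ans with
  | nil => simp [PySem.List.enumerate_nil, joinCase]
  | cons w ws ih =>
    rw [PySem.List.enumerate_cons, List.foldl_cons]
    have hin := inner_eq w 0 ans
    simp only [Nat.cast_zero] at hin
    have hcast : (k : Int) + 1 = ((k + 1 : Nat) : Int) := by push_cast; ring
    cases ws with
    | nil =>
      have hcond : ((k : Int) != (n : Int) - 1) = false := by
        simp at h ⊢; omega
      simp only [hin, hcond, if_false, Bool.false_eq_true]
      rw [PySem.List.enumerate_nil]
      simp [joinCase]
    | cons w' ws' =>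
      have hcond : ((k : Int) != (n : Int) - 1) = true := by
        simp only [List.length_cons] at h
        simp; omega
      simp only [hin, hcond, if_true, hcast]
      rw [ih (k+1) _ (by simp at h ⊢; omega)]
      simp [joinCase]

theorem alt_loop (l : List Char) (acc : List Char) (k : Nat) :
    (l.foldl (fun (st : List Char × Nat) c =>
      if c == ' ' then (st.1 ++ [' '], 0)
      else (st.1 ++ [if st.2 % 2 == 0 then PySem.Chars.upperChar c else PySem.Chars.lowerChar c], st.2 + 1))
      (acc, k)).1 = acc ++ onePass l k := by
  induction l generalizing acc k with
  | nil => simp [onePass]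
  | cons c cs ih =>
    by_cases hc : c = ' '
    · simpa [hc, onePass] using ih (acc ++ [' ']) 0
    · simpa [hc, onePass, caseChar] using ih (acc ++ [caseChar k c]) (k + 1)

-- ===== VERDICT (by name: the statement is the Claim_ definition above) =====
theorem solution_spec : Claim_equal_solution := by
  intro s _
  show solution s = solution_alt s
  unfold solution solution_alt
  have hA := outer_eq (splitSp [] s.toList) 0 (splitSp [] s.toList).length [] (Nat.zero_add _)
  have hB := alt_loop s.toList [] 0
  simp only [Nat.cast_zero] at hA
  simp only [splitOn_eq_splitSp]
  rw [hA, hB, join_split]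
  simp [wordCase]
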